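-- pv_equiv track=rewrite | github.com/lauralima6/pc-imd | unidade3/lista5/q1.py | criptografar
-- ===== SOURCE A (Python) =====
-- def criptografar(palavra):
--     palavra = palavra.lower()
--     criptografada = ""
--
--     for letra in palavra:
--         if letra >= 'a' and letra <= 'e':
--             criptografada += '1'
--         elif letra >= 'f' and letra <= 'j':
--             criptografada += '2'
--         elif letra >= 'k' and letra <= 'o':
--             criptografada += '3'
--         elif letra >= 'p' and letra <= 'z':
--             criptografada += '4'
--         else:
--             criptografada += '5'
--
--     return criptografada
-- ===== SOURCE B (Python) =====
-- def criptografar(palavra):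
--     return ''.join(
--         str(min((ord(c) - 97) // 5, 3) + 1) if 'a' <= c <= 'z' else '5'
--         for c in palavra.lower()
--     )
-- ===== Notes on version B (the rewrite author's own statement) =====
-- stated objective: simpler
-- what changed: Replaces the four-branch comparison cascade with a closed-form arithmetic bucket per character ((ord(c)-97)//5 clamped to 3) joined in one expression.
import Mathlib
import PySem

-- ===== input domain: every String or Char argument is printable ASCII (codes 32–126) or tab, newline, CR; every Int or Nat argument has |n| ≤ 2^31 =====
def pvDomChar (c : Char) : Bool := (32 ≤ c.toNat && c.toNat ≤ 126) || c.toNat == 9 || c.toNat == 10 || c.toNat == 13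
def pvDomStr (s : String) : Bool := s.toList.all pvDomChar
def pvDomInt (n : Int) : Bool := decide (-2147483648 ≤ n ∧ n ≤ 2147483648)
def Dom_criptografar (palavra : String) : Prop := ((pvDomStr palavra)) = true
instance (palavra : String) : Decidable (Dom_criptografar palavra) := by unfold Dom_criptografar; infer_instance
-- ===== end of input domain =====

-- B replaces A's four-branch comparison cascade with a closed-form arithmetic bucket per
-- character, joined in one expression (objective: simpler).

-- ===== PORT A =====
-- step of A's loop body: the if/elif cascade appending one digit to the accumulator
def criptStepA (acc : String) (letra : Char) : String :=
  if letra ≥ 'a' ∧ letra ≤ 'e' then acc ++ "1"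
  else if letra ≥ 'f' ∧ letra ≤ 'j' then acc ++ "2"
  else if letra ≥ 'k' ∧ letra ≤ 'o' then acc ++ "3"
  else if letra ≥ 'p' ∧ letra ≤ 'z' then acc ++ "4"
  else acc ++ "5"

def criptografar (palavra : String) : String :=
  (PySem.Str.lower palavra).toList.foldl criptStepA ""

-- ===== PORT B =====
-- per-character code of B: str(min((ord(c)-97)//5, 3) + 1) if 'a'<=c<='z' else '5'
def criptCode (c : Char) : String :=
  if 'a' ≤ c ∧ c ≤ 'z' then
    PySem.Int.toStr (min (PySem.Int.floordiv ((c.toNat : Int) - 97) 5) 3 + 1)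
  else "5"

def criptografar_alt (palavra : String) : String :=
  String.join ((PySem.Str.lower palavra).toList.map criptCode)

-- ===== PRECONDITION & SPEC =====
def Spec_criptografar (palavra : String) (out : String) : Prop := out = criptografar_alt palavra
instance (palavra : String) (out : String) : Decidable (Spec_criptografar palavra out) := by unfold Spec_criptografar; infer_instance

-- ===== CLAIM (what is proved, stated in full; the proofs are below) =====
def Claim_equal_criptografar : Prop := ∀ (palavra : String), Dom_criptografar palavra → Spec_criptografar palavra (criptografar palavra)

-- ===== LEMMAS AND PROOFS =====

theorem string_join_cons (a : String) (l : List String) :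
    String.join (a :: l) = a ++ String.join l := by
  have h : ∀ (l : List String) (x y : String),
      l.foldl (· ++ ·) (x ++ y) = x ++ l.foldl (· ++ ·) y := by
    intro l
    induction l with
    | nil => intro x y; rfl
    | cons b t ih => intro x y; simpa [String.append_assoc] using ih x (y ++ b)
  simpa [String.join] using h l a ""

theorem char_le_toNat (a b : Char) : (a ≤ b) ↔ a.toNat ≤ b.toNat := by
  constructor
  · intro h; exact Fin.mk_le_mk.mp h
  · intro h; exact Fin.mk_le_mk.mpr h

theorem criptStepA_eq (acc : String) (c : Char) :
    criptStepA acc c = acc ++ criptCode c := by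
  unfold criptStepA criptCode
  have ea : ('a' : Char).toNat = 97 := rfl
  have ee : ('e' : Char).toNat = 101 := rfl
  have ef : ('f' : Char).toNat = 102 := rfl
  have ej : ('j' : Char).toNat = 106 := rfl
  have ek : ('k' : Char).toNat = 107 := rfl
  have eo : ('o' : Char).toNat = 111 := rfl
  have ep : ('p' : Char).toNat = 112 := rfl
  have ez : ('z' : Char).toNat = 122 := rfl
  simp only [ge_iff_le, char_le_toNat, ea, ee, ef, ej, ek, eo, ep, ez]
  split_ifs with h1 h2 h3 h4 h5 h6 h7 h8 h9 <;> try rfl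
  all_goals first
  | (exfalso; omega)
  | (congr 1
     rw [PySem.Int.floordiv_eq_ediv_of_pos (by norm_num)]
     first
     | (have hv : min (((c.toNat : Int) - 97) / 5) 3 + 1 = 1 := by omega
        rw [hv]; decide)
     | (have hv : min (((c.toNat : Int) - 97) / 5) 3 + 1 = 2 := by omega
        rw [hv]; decide)
     | (have hv : min (((c.toNat : Int) - 97) / 5) 3 + 1 = 3 := by omega
        rw [hv]; decide)
     | (have hv : min (((c.toNat : Int) - 97) / 5) 3 + 1 = 4 := by omega
        rw [hv]; decide))

theorem criptFold_eq (l : List Char) (acc : String) :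
    l.foldl criptStepA acc = acc ++ String.join (l.map criptCode) := by
  induction l generalizing acc with
  | nil => simp [String.join]
  | cons c t ih =>
    simp only [List.foldl_cons, List.map_cons, string_join_cons, ih,
      criptStepA_eq, String.append_assoc]

-- ===== VERDICT (by name: the statement is the Claim_ definition above) =====
theorem criptografar_spec : Claim_equal_criptografar := by
  intro palavra _
  unfold Spec_criptografar criptografar criptografar_alt
  simpa using criptFold_eq (PySem.Str.lower palavra).toList ""
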